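-- pv_equiv track=rewrite | github.com/briand0725/DesktopAssistant | DesktopAssistant/main.py | extract_artist_name
-- ===== SOURCE A (Python) =====
-- def extract_artist_name(tokens):
--     start_index = None
--     end_index = len(tokens)
--
--     for i in range(len(tokens)):
--         if tokens[i].lower() == "by" and i < len(tokens) - 1:
--              start_index = i + 1
--
--     if start_index is not None:
--        song_name = " ".join(tokens[start_index:end_index])
--        return song_name.lower()
--     else:
--        return ""
-- ===== SOURCE B (Python) =====
-- def extract_artist_name(tokens):
--     # scan from the end; first hit is the last 'by' (the final token never counts)
--     for i in range(len(tokens) - 2, -1, -1):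
--         if tokens[i].lower() == "by":
--             return " ".join(tokens[i + 1:]).lower()
--     return ""
-- ===== Notes on version B (the rewrite author's own statement) =====
-- stated objective: idiomatic
-- what changed: Replaces A's forward full scan that keeps overwriting start_index with an early-terminating reverse scan that returns at the first (i.e. last) qualifying 'by'.
import Mathlib
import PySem

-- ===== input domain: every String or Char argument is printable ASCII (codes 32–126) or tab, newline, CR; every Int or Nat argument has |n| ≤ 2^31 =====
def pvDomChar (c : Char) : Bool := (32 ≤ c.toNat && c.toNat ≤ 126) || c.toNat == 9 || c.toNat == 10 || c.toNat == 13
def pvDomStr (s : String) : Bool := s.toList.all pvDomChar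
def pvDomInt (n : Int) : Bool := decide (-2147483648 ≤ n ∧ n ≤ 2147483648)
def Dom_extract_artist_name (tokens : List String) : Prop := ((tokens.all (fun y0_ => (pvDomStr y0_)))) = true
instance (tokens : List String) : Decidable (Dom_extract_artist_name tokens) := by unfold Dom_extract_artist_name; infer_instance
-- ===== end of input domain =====

-- B replaces A's forward overwrite-the-index scan with an early-terminating reverse scan (idiomatic).

-- ===== PORT A =====
def extract_artist_name (tokens : List String) : String :=
  let endIndex : Int := tokens.length
  let startIndex : Option Int :=
    (PySem.List.pyRange 0 tokens.length 1).foldl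
      (fun si i =>
        if PySem.Str.lower (PySem.List.pyGetD tokens i "") == "by" && decide (i < (tokens.length : Int) - 1)
        then some (i + 1) else si)
      none
  match startIndex with
  | some s => PySem.Str.lower (PySem.Str.join " " (PySem.List.slice tokens (some s) (some endIndex)))
  | none => ""

-- ===== PORT B =====
-- loop 'for i in range(len(tokens)-2, -1, -1)' with early return
def eanGo (tokens : List String) : List Int → String
  | [] => ""
  | i :: rest =>
    if PySem.Str.lower (PySem.List.pyGetD tokens i "") == "by" then
      PySem.Str.lower (PySem.Str.join " " (PySem.List.slice tokens (some (i + 1)) none))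
    else eanGo tokens rest

def extract_artist_name_alt (tokens : List String) : String :=
  eanGo tokens (PySem.List.pyRange ((tokens.length : Int) - 2) (-1) (-1))

-- ===== PRECONDITION & SPEC =====
def Spec_extract_artist_name (tokens : List String) (out : String) : Prop := out = extract_artist_name_alt tokens
instance (tokens : List String) (out : String) : Decidable (Spec_extract_artist_name tokens out) := by unfold Spec_extract_artist_name; infer_instance

-- ===== CLAIM (what is proved, stated in full; the proofs are below) =====
def Claim_equal_extract_artist_name : Prop := ∀ (tokens : List String), Dom_extract_artist_name tokens → Spec_extract_artist_name tokens (extract_artist_name tokens)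

-- ===== LEMMAS AND PROOFS =====

-- a last-match foldl equals the first match of the reversed list
theorem foldl_last_eq_find_reverse (c : Int → Bool) (f : Int → Int) :
    ∀ (l : List Int) (init : Option Int),
      l.foldl (fun si i => if c i then some (f i) else si) init =
        (match l.reverse.find? c with
         | some i => some (f i)
         | none => init) := by
  intro l
  induction l with
  | nil => intro init; simp
  | cons x xs ih =>
    intro init
    simp only [List.foldl_cons, List.reverse_cons, List.find?_append]
    rw [ih]
    cases h : xs.reverse.find? c with
    | some i => simp
    | none =>
      simp only [Option.none_or]
      by_cases hc : c x <;> simp [List.find?, hc]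

theorem find?_congr_mem {p q : Int → Bool} :
    ∀ (l : List Int), (∀ x ∈ l, p x = q x) → l.find? p = l.find? q := by
  intro l
  induction l with
  | nil => intro _; rfl
  | cons x xs ih =>
    intro h
    have hx := h x (by simp)
    simp only [List.find?, hx]
    cases q x
    · exact ih (fun y hy => h y (by simp [hy]))
    · rfl

theorem eanGo_eq_find (tokens : List String) :
    ∀ (l : List Int),
      eanGo tokens l =
        (match l.find? (fun i => PySem.Str.lower (PySem.List.pyGetD tokens i "") == "by") with
         | some i => PySem.Str.lower (PySem.Str.join " " (PySem.List.slice tokens (some (i + 1)) none))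
         | none => "") := by
  intro l
  induction l with
  | nil => rfl
  | cons x xs ih =>
    simp only [eanGo, List.find?]
    by_cases hc : PySem.Str.lower (PySem.List.pyGetD tokens x "") == "by" <;> simp [hc, ih]

theorem slice_to_len (tokens : List String) (i : Int) (h0 : 0 ≤ i) :
    PySem.List.slice tokens (some i) (some (tokens.length : Int)) =
      PySem.List.slice tokens (some i) none := by
  rw [PySem.List.slice_toNat tokens h0 (by positivity), PySem.List.slice_from tokens h0]
  exact List.take_of_length_le (by simp)

-- ===== VERDICT (by name: the statement is the Claim_ definition above) =====
theorem extract_artist_name_spec : Claim_equal_extract_artist_name := by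
  unfold Claim_equal_extract_artist_name
  intro tokens _
  unfold Spec_extract_artist_name extract_artist_name extract_artist_name_alt
  set n : Int := (tokens.length : Int) with hn
  have hrev : PySem.List.pyRange (n - 2) (-1) (-1) = (PySem.List.pyRange 0 (n - 1) 1).reverse := by
    rw [PySem.List.pyRange_neg_one_eq_reverse, show (-1 : Int) + 1 = 0 by ring,
      show n - 2 + 1 = n - 1 by ring]
  rw [hrev, eanGo_eq_find, foldl_last_eq_find_reverse]
  by_cases hpos : 1 ≤ n
  · have hsplit : PySem.List.pyRange 0 n 1 =
        PySem.List.pyRange 0 (n - 1) 1 ++ [n - 1] := by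
      have h2 := PySem.List.pyRange_one_singleton (n - 1)
      rw [show (n - 1) + 1 = n by ring] at h2
      rw [PySem.List.pyRange_one_append 0 (n - 1) n (by omega) (by omega), h2]
    rw [hsplit]
    simp only [List.reverse_append, List.reverse_singleton, List.singleton_append, List.find?]
    have hlast : (PySem.Str.lower (PySem.List.pyGetD tokens (n - 1) "") == "by" &&
        decide ((n - 1) < n - 1)) = false := by simp
    rw [hlast]
    have hcong : (PySem.List.pyRange 0 (n - 1) 1).reverse.find?
          (fun i => PySem.Str.lower (PySem.List.pyGetD tokens i "") == "by" && decide (i < n - 1)) =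
        (PySem.List.pyRange 0 (n - 1) 1).reverse.find?
          (fun i => PySem.Str.lower (PySem.List.pyGetD tokens i "") == "by") := by
      apply find?_congr_mem
      intro x hx
      have hm : x ∈ PySem.List.pyRange 0 (n - 1) 1 := List.mem_reverse.mp hx
      have hb := (PySem.List.mem_pyRange_one).mp hm
      have hd : decide (x < n - 1) = true := by simp; omega
      simp [hd]
    rw [hcong]
    cases hf : (PySem.List.pyRange 0 (n - 1) 1).reverse.find?
        (fun i => PySem.Str.lower (PySem.List.pyGetD tokens i "") == "by") with
    | none => simp
    | some i =>
      have hm : i ∈ PySem.List.pyRange 0 (n - 1) 1 := by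
        have := List.mem_of_find?_eq_some hf
        simpa using this
      have hb := (PySem.List.mem_pyRange_one).mp hm
      simp only []
      rw [slice_to_len tokens (i + 1) (by omega)]
  · have h1 : PySem.List.pyRange 0 n 1 = [] := PySem.List.pyRange_one_eq_nil (by omega)
    have h2 : PySem.List.pyRange 0 (n - 1) 1 = [] := PySem.List.pyRange_one_eq_nil (by omega)
    rw [h1, h2]
    rfl
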